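-- pv_equiv track=rewrite | github.com/Sehajpreet01/Data-Structure-Algorithm | prac_array.py | reverse_even
-- ===== SOURCE A (Python) =====
-- def reverse_even(arr):
--     ev_res = []
--     final_list = []
--
--
--     for i in range(len(arr)-1, -1, -1):
--         if arr[i]%2 ==0:
--             ev_res.append(arr[i])
--
--     idx = 0
--     for i in range(len(arr)):
--         if arr[i]%2 ==0:
--             arr[i] = ev_res[idx]
--             idx+=1
--
--     return arr
-- ===== SOURCE B (Python) =====
-- def reverse_even(arr):
--     # Two-pointer in-place reversal of the even-valued elements.
--     left, right = 0, len(arr) - 1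
--     while left < right:
--         if arr[left] % 2 != 0:
--             left += 1
--         elif arr[right] % 2 != 0:
--             right -= 1
--         else:
--             arr[left], arr[right] = arr[right], arr[left]
--             left += 1
--             right -= 1
--     return arr
-- ===== Notes on version B (the rewrite author's own statement) =====
-- stated objective: alternative
-- what changed: Replaces A's two-pass scheme (collect the even values in reverse into an auxiliary list, then rewrite the even positions from it) with a single two-pointer in-place traversal that swaps even elements from both ends inward, keeping no auxiliary list.
import Mathlib
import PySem

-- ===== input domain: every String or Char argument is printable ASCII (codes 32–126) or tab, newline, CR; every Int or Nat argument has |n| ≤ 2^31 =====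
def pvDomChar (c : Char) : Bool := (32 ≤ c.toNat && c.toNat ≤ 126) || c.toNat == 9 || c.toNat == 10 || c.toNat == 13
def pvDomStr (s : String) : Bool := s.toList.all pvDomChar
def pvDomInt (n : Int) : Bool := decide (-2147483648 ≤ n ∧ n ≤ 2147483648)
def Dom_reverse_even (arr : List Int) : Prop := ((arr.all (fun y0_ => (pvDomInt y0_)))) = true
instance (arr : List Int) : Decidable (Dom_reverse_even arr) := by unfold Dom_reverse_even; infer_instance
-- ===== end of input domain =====

-- B replaces A's aux-list-and-rewrite two-pass scheme by a two-pointer in-place swap of the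
-- even elements from both ends; return values agree (both Pythons mutate their argument in place;
-- the equivalence proved here is about the returned list).

-- ===== PORT A =====
-- Literal port of A: the mutable list `arr` becomes the folded state; loop indices are Python
-- ints via PySem.List.pyRange; `arr[i]` is PySem.List.pyGetD (indices are always in range here,
-- where pyGetD is exact); the write `arr[i] = ev_res[idx]` is List.set at i.toNat (i ≥ 0 in range).
def reverse_even (arr : List Int) : List Int :=
  let n : Int := arr.length
  let ev_res : List Int :=
    (PySem.List.pyRange (n - 1) (-1) (-1)).foldl
      (fun ev i =>
        if PySem.Int.mod (PySem.List.pyGetD arr i 0) 2 = 0 then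
          ev ++ [PySem.List.pyGetD arr i 0]
        else ev) []
  let res :=
    (PySem.List.pyRange 0 n 1).foldl
      (fun (st : List Int × Nat) i =>
        if PySem.Int.mod (PySem.List.pyGetD st.1 i 0) 2 = 0 then
          (st.1.set i.toNat (PySem.List.pyGetD ev_res (st.2 : Int) 0), st.2 + 1)
        else st)
      (arr, 0)
  res.1

-- ===== PORT B =====
-- Literal port of B's while-loop: state (arr, left, right); left/right are Nat (they start at
-- 0 and len-1 and only move inward; Python's right = -1 on the empty list never enters the loop,
-- matching Nat's 0 - 1 = 0 with left = 0). Reads arr[left]/arr[right] are in range inside the loop.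
def pvBGo (a : List Int) (l r : Nat) : List Int :=
  if _h : l < r then
    if PySem.Int.mod (a.getD l 0) 2 ≠ 0 then pvBGo a (l + 1) r
    else if PySem.Int.mod (a.getD r 0) 2 ≠ 0 then pvBGo a l (r - 1)
    else pvBGo ((a.set l (a.getD r 0)).set r (a.getD l 0)) (l + 1) (r - 1)
  else a
termination_by r - l
decreasing_by all_goals omega

def reverse_even_alt (arr : List Int) : List Int :=
  pvBGo arr 0 (arr.length - 1)

-- ===== PRECONDITION & SPEC =====
def Spec_reverse_even (arr : List Int) (out : List Int) : Prop := out = reverse_even_alt arr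
instance (arr : List Int) (out : List Int) : Decidable (Spec_reverse_even arr out) := by unfold Spec_reverse_even; infer_instance

-- ===== CLAIM (what is proved, stated in full; the proofs are below) =====
def Claim_equal_reverse_even : Prop := ∀ (arr : List Int), Dom_reverse_even arr → Spec_reverse_even arr (reverse_even arr)

-- ===== LEMMAS AND PROOFS =====

-- The common functional description: replace the even elements of `s`, left to right, by the
-- elements of `es` (the reversed list of even values of `s`).
def pvEvens (s : List Int) : List Int := s.filter (fun x => PySem.Int.mod x 2 = 0)

def pvFill : List Int → List Int → List Int
  | [], _ => []
  | x :: xs, es =>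
      if PySem.Int.mod x 2 = 0 then es.headD 0 :: pvFill xs es.tail else x :: pvFill xs es

def pvRevE (s : List Int) : List Int := pvFill s (pvEvens s).reverse

theorem pvFill_append (s t es : List Int) :
    pvFill (s ++ t) es = pvFill s es ++ pvFill t (es.drop (pvEvens s).length) := by
  induction s generalizing es with
  | nil => simp [pvFill, pvEvens]
  | cons x xs ih =>
      by_cases hx : (2 : Int) ∣ x <;>
        simp [pvFill, pvEvens, PySem.Int.mod_eq_zero_iff_dvd, hx, ih, List.filter_cons,
          List.tail_drop, List.drop_drop, Nat.add_comm]

theorem pvFill_extend (s es ex : List Int) (h : (pvEvens s).length ≤ es.length) :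
    pvFill s (es ++ ex) = pvFill s es := by
  induction s generalizing es with
  | nil => simp [pvFill]
  | cons x xs ih =>
      by_cases hx : (2 : Int) ∣ x
      · have hne : es ≠ [] := by
          intro hnil; subst hnil
          simp [pvEvens, List.filter_cons, hx] at h
        obtain ⟨e, es', rfl⟩ := List.exists_cons_of_ne_nil hne
        have h' : (pvEvens xs).length ≤ es'.length := by
          simpa [pvEvens, List.filter_cons, hx, Nat.succ_le_succ_iff] using h
        simp [pvFill, PySem.Int.mod_eq_zero_iff_dvd, hx, ih _ h']
      · have h' : (pvEvens xs).length ≤ es.length := by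
          simpa [pvEvens, List.filter_cons, hx] using h
        simp [pvFill, PySem.Int.mod_eq_zero_iff_dvd, hx, ih _ h']

theorem pvRevE_nil : pvRevE [] = [] := by simp [pvRevE, pvFill]

theorem pvRevE_single (x : Int) : pvRevE [x] = [x] := by
  by_cases hx : (2 : Int) ∣ x <;>
    simp [pvRevE, pvEvens, pvFill, List.filter_cons, PySem.Int.mod_eq_zero_iff_dvd, hx]

theorem pvRevE_cons_odd (x : Int) (t : List Int) (hx : PySem.Int.mod x 2 ≠ 0) :
    pvRevE (x :: t) = x :: pvRevE t := by
  simp only [Ne, PySem.Int.mod_eq_zero_iff_dvd] at hx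
  simp [pvRevE, pvEvens, pvFill, List.filter_cons, PySem.Int.mod_eq_zero_iff_dvd, hx]

theorem pvRevE_concat_odd (s : List Int) (y : Int) (hy : PySem.Int.mod y 2 ≠ 0) :
    pvRevE (s ++ [y]) = pvRevE s ++ [y] := by
  simp only [Ne, PySem.Int.mod_eq_zero_iff_dvd] at hy
  have he : pvEvens (s ++ [y]) = pvEvens s := by
    simp [pvEvens, List.filter_append, List.filter_cons, hy]
  simp [pvRevE, he, pvFill_append, pvFill, PySem.Int.mod_eq_zero_iff_dvd, hy]

theorem pvRevE_both_even (x y : Int) (m : List Int)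
    (hx : PySem.Int.mod x 2 = 0) (hy : PySem.Int.mod y 2 = 0) :
    pvRevE (x :: (m ++ [y])) = y :: (pvRevE m ++ [x]) := by
  rw [PySem.Int.mod_eq_zero_iff_dvd] at hx hy
  have he : pvEvens (x :: (m ++ [y])) = x :: (pvEvens m ++ [y]) := by
    simp [pvEvens, List.filter_append, List.filter_cons, hx, hy]
  have hrev : (pvEvens (x :: (m ++ [y]))).reverse = y :: ((pvEvens m).reverse ++ [x]) := by
    simp [he]
  have hlen : ((pvEvens m).reverse).length = (pvEvens m).length := by simp
  calc pvRevE (x :: (m ++ [y]))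
      = pvFill (x :: (m ++ [y])) (y :: ((pvEvens m).reverse ++ [x])) := by
        rw [pvRevE, hrev]
    _ = y :: pvFill (m ++ [y]) ((pvEvens m).reverse ++ [x]) := by
        simp [pvFill, PySem.Int.mod_eq_zero_iff_dvd, hx]
    _ = y :: (pvFill m ((pvEvens m).reverse ++ [x]) ++
          pvFill [y] (((pvEvens m).reverse ++ [x]).drop (pvEvens m).length)) := by
        rw [pvFill_append]
    _ = y :: (pvRevE m ++ [x]) := by
        rw [pvFill_extend m _ [x] (by simp)]
        have hdrop : ((pvEvens m).reverse ++ [x]).drop (pvEvens m).length = [x] := by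
          rw [← hlen, List.drop_left]
        rw [hdrop]
        simp [pvRevE, pvFill, PySem.Int.mod_eq_zero_iff_dvd, hy]

-- ===== the B side: the two-pointer loop realises pvRevE on the segment [l, r] =====
theorem pvBGo_stop (a : List Int) (l r : Nat) (hnl : ¬ l < r) (hr : r + 1 ≤ a.length)
    (hl : l ≤ r + 1) :
    a = a.take l ++ pvRevE ((a.drop l).take (r + 1 - l)) ++ a.drop (r + 1) := by
  rcases Nat.lt_or_ge l (r + 1) with h | h
  · have hlr : l = r := by omega
    subst hlr
    have hlen : l < a.length := by omega
    have hd : a.drop l = a[l] :: a.drop (l + 1) := List.drop_eq_getElem_cons hlen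
    have h1 : l + 1 - l = 1 := by omega
    have hseg : (a.drop l).take (l + 1 - l) = [a[l]] := by rw [h1, hd]; rfl
    rw [hseg, pvRevE_single]
    conv_lhs => rw [← List.take_append_drop l a]
    rw [hd]
    simp
  · have hlr : l = r + 1 := by omega
    subst hlr
    simp [pvRevE_nil]

theorem pvBGo_eq (k : Nat) :
    ∀ (a : List Int) (l r : Nat), r - l ≤ k → r + 1 ≤ a.length → l ≤ r + 1 →
      pvBGo a l r = a.take l ++ pvRevE ((a.drop l).take (r + 1 - l)) ++ a.drop (r + 1) := by
  induction k with
  | zero =>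
      intro a l r hk hr hl
      have hnl : ¬ l < r := by omega
      rw [pvBGo.eq_def, dif_neg hnl]
      exact pvBGo_stop a l r hnl hr hl
  | succ k ih =>
      intro a l r hk hr hl
      by_cases hlt : l < r
      · have hll : l < a.length := by omega
        have hrr : r < a.length := by omega
        have hgl : a.getD l 0 = a[l] := List.getD_eq_getElem a 0 hll
        have hgr : a.getD r 0 = a[r] := List.getD_eq_getElem a 0 hrr
        have hdl : a.drop l = a[l] :: a.drop (l + 1) := List.drop_eq_getElem_cons hll
        rw [pvBGo.eq_def, dif_pos hlt, hgl, hgr]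
        by_cases hx : PySem.Int.mod a[l] 2 ≠ 0
        · rw [if_pos hx, ih a (l + 1) r (by omega) hr (by omega)]
          have h1 : r + 1 - l = (r + 1 - (l + 1)) + 1 := by omega
          have hseg : (a.drop l).take (r + 1 - l)
              = a[l] :: (a.drop (l + 1)).take (r + 1 - (l + 1)) := by
            rw [hdl, h1, List.take_succ_cons]
          have htk : a.take (l + 1) = a.take l ++ [a[l]] := by
            rw [List.take_succ]; simp [List.getElem?_eq_getElem hll]
          rw [hseg, pvRevE_cons_odd _ _ hx, htk]
          simp only [List.append_assoc, List.singleton_append, List.cons_append, List.nil_append]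
        · push_neg at hx
          rw [if_neg (by simp only [ne_eq, not_not]; exact hx)]
          by_cases hy : PySem.Int.mod a[r] 2 ≠ 0
          · rw [if_pos hy, ih a l (r - 1) (by omega) (by omega) (by omega)]
            have h0 : r - 1 + 1 = r := by omega
            rw [h0]
            have hdr : a.drop r = a[r] :: a.drop (r + 1) := List.drop_eq_getElem_cons hrr
            have h1 : r + 1 - l = (r - l) + 1 := by omega
            have hgd : (a.drop l)[r - l]? = some a[r] := by
              rw [List.getElem?_drop]
              have h2 : l + (r - l) = r := by omega
              rw [h2, List.getElem?_eq_getElem hrr]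
            have hseg : (a.drop l).take (r + 1 - l) = (a.drop l).take (r - l) ++ [a[r]] := by
              rw [h1, List.take_succ, hgd]
              rfl
            rw [hseg, pvRevE_concat_odd _ _ hy, hdr]
            simp
          · push_neg at hy
            rw [if_neg (by simp only [ne_eq, not_not]; exact hy)]
            have hlen' : ((a.set l a[r]).set r a[l]).length = a.length := by simp
            rw [ih ((a.set l a[r]).set r a[l]) (l + 1) (r - 1) (by omega)
              (by rw [hlen']; omega) (by omega)]
            have h0 : r - 1 + 1 = r := by omega
            rw [h0]
            have htk1 : a.take (l + 1) = a.take l ++ [a[l]] := by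
              rw [List.take_succ]; simp [List.getElem?_eq_getElem hll]
            -- (A) the prefix of the swapped list
            have hA : ((a.set l a[r]).set r a[l]).take (l + 1) = a.take l ++ [a[r]] := by
              rw [List.take_set, List.set_eq_of_length_le (by simp; omega),
                List.take_set, htk1]
              rw [List.set_append]
              simp [List.length_take, Nat.min_eq_left (by omega : l ≤ a.length)]
            -- (B) the suffix of the swapped list
            have hdr : a.drop r = a[r] :: a.drop (r + 1) := List.drop_eq_getElem_cons hrr
            have hB : ((a.set l a[r]).set r a[l]).drop r = a[l] :: a.drop (r + 1) := by
              rw [List.drop_set]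
              simp only [Nat.lt_irrefl, if_neg, Nat.sub_self]
              rw [List.drop_set_of_lt (by omega : l < r), hdr]
              rfl
            -- (C) the middle segment of the swapped list is untouched
            have hC : (((a.set l a[r]).set r a[l]).drop (l + 1)).take (r - (l + 1))
                = (a.drop (l + 1)).take (r - (l + 1)) := by
              rw [List.drop_set]
              have hnr : ¬ r < l + 1 := by omega
              rw [if_neg hnr, List.drop_set_of_lt (by omega : l < l + 1)]
              rw [List.take_set, List.set_eq_of_length_le (by simp)]
            -- (D) the original segment decomposes as a[l] :: middle ++ [a[r]]
            have h1 : r + 1 - l = (r - (l + 1) + 1) + 1 := by omega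
            have hgd : (a.drop (l + 1))[r - (l + 1)]? = some a[r] := by
              rw [List.getElem?_drop]
              have h2 : l + 1 + (r - (l + 1)) = r := by omega
              rw [h2, List.getElem?_eq_getElem hrr]
            have hD : (a.drop l).take (r + 1 - l)
                = a[l] :: ((a.drop (l + 1)).take (r - (l + 1)) ++ [a[r]]) := by
              rw [h1, hdl, List.take_succ_cons, List.take_succ, hgd]
              rfl
            rw [hA, hB, hC, hD, pvRevE_both_even _ _ _ hx hy]
            simp
      · rw [pvBGo.eq_def, dif_neg hlt]
        exact pvBGo_stop a l r hlt hr hl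

theorem reverse_even_alt_eq (arr : List Int) : reverse_even_alt arr = pvRevE arr := by
  cases arr with
  | nil =>
      rw [reverse_even_alt, pvBGo.eq_def]
      simp [pvRevE_nil]
  | cons x xs =>
      have h := pvBGo_eq ((x :: xs).length - 1) (x :: xs) 0 ((x :: xs).length - 1)
        (le_refl _) (by simp) (by omega)
      rw [reverse_even_alt, h]
      simp

-- ===== the A side =====
-- the first auxiliary loop produces the reversed list of even values
theorem pvEvRes_eq (arr : List Int) :
    (PySem.List.pyRange ((arr.length : Int) - 1) (-1) (-1)).foldl
      (fun ev i =>
        if PySem.Int.mod (PySem.List.pyGetD arr i 0) 2 = 0 then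
          ev ++ [PySem.List.pyGetD arr i 0]
        else ev) []
    = (pvEvens arr).reverse := by
  rw [PySem.List.pyRange_neg_one_eq_reverse]
  have hshape := PySem.List.foldl_append_if
    (fun i => decide (PySem.Int.mod (PySem.List.pyGetD arr i 0) 2 = 0))
    (fun i => PySem.List.pyGetD arr i 0)
    ((PySem.List.pyRange (-1 + 1) ((arr.length : Int) - 1 + 1)).reverse) []
  simp only [decide_eq_true_eq] at hshape
  rw [hshape]
  have h1 : (-1 : Int) + 1 = 0 := by norm_num
  have h2 : ((arr.length : Int) - 1 + 1) = (arr.length : Int) := by ring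
  rw [h1, h2, List.filter_reverse, List.map_reverse]
  have h3 : List.filter (fun i => decide (PySem.Int.mod (PySem.List.pyGetD arr i 0) 2 = 0))
        (PySem.List.pyRange 0 (arr.length : Int))
      = List.filter ((fun x => decide (PySem.Int.mod x 2 = 0)) ∘
          (fun i => PySem.List.pyGetD arr i 0)) (PySem.List.pyRange 0 (arr.length : Int)) := rfl
  rw [h3, ← List.filter_map, PySem.List.map_pyGetD_pyRange_zero']
  simp [pvEvens]

theorem pvHeadD_drop (ev : List Int) (idx : Nat) : (ev.drop idx).headD 0 = ev.getD idx 0 := by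
  induction ev generalizing idx with
  | nil => simp
  | cons a t ih => cases idx <;> simp [ih]

-- the rewriting loop of A computes pvFill, consuming ev from position idx on
theorem pvLoopA (ev : List Int) (rest : List Int) :
    ∀ (pre : List Int) (idx : Nat),
      ((List.range rest.length).map (fun j => ((pre.length + j : Nat) : Int))).foldl
        (fun (st : List Int × Nat) i =>
          if PySem.Int.mod (PySem.List.pyGetD st.1 i 0) 2 = 0 then
            (st.1.set i.toNat (PySem.List.pyGetD ev (st.2 : Int) 0), st.2 + 1)
          else st)
        (pre ++ rest, idx)
      = (pre ++ pvFill rest (ev.drop idx), idx + (pvEvens rest).length) := by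
  induction rest with
  | nil => intro pre idx; simp [pvFill, pvEvens]
  | cons x t ih =>
      intro pre idx
      rw [List.length_cons, List.range_succ_eq_map]
      simp only [List.map_cons, List.map_map, List.foldl_cons]
      have hget : PySem.List.pyGetD (pre ++ x :: t) ((pre.length + 0 : Nat) : Int) 0 = x := by
        rw [PySem.List.pyGetD_natCast, Nat.add_zero,
          List.getD_append_right pre (x :: t) 0 pre.length (le_refl _)]
        simp
      have hmapeq :
          (List.range t.length).map ((fun j => ((pre.length + j : Nat) : Int)) ∘ (fun j => j + 1))
          = (List.range t.length).map (fun j => (((pre.length + 1) + j : Nat) : Int)) := by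
        apply List.map_congr_left
        intro j _
        simp
        omega
      by_cases hx : PySem.Int.mod x 2 = 0
      · have hx' : (2 : Int) ∣ x := (PySem.Int.mod_eq_zero_iff_dvd x 2).mp hx
        rw [if_pos (by rw [hget]; exact hx)]
        have hset : (pre ++ x :: t).set ((pre.length + 0 : Nat) : Int).toNat
            (PySem.List.pyGetD ev (idx : Int) 0) = (pre ++ [PySem.List.pyGetD ev (idx : Int) 0]) ++ t := by
          simp [List.set_append]
        rw [hset, hmapeq]
        have ih' := ih (pre ++ [PySem.List.pyGetD ev (idx : Int) 0]) (idx + 1)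
        simp only [List.length_append, List.length_singleton] at ih'
        rw [ih']
        have hv : PySem.List.pyGetD ev (idx : Int) 0 = (ev.drop idx).headD 0 := by
          rw [PySem.List.pyGetD_natCast, pvHeadD_drop]
        have htl : ev.drop (idx + 1) = (ev.drop idx).tail := by
          rw [List.tail_drop]
        refine Prod.ext ?_ ?_
        · simp only [pvFill]
          rw [if_pos hx, ← hv, ← htl]
          simp only [List.append_assoc, List.singleton_append]
        · simp [pvEvens, List.filter_cons, hx']
          omega
      · have hx' : ¬ (2 : Int) ∣ x := fun hd => hx ((PySem.Int.mod_eq_zero_iff_dvd x 2).mpr hd)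
        rw [if_neg (by rw [hget]; exact hx)]
        have hpre : pre ++ x :: t = (pre ++ [x]) ++ t := by simp
        rw [hpre, hmapeq]
        have ih' := ih (pre ++ [x]) idx
        simp only [List.length_append, List.length_singleton] at ih'
        rw [ih']
        refine Prod.ext ?_ ?_
        · simp only [pvFill]
          rw [if_neg hx]
          simp only [List.append_assoc, List.singleton_append]
        · simp [pvEvens, List.filter_cons, hx']

theorem reverse_even_eq (arr : List Int) : reverse_even arr = pvRevE arr := by
  rw [reverse_even]
  simp only [pvEvRes_eq]
  rw [PySem.List.pyRange_zero_natCast]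
  have h := pvLoopA (pvEvens arr).reverse arr [] 0
  simp only [List.nil_append, List.length_nil, Nat.zero_add] at h
  rw [h]
  simp [pvRevE]

-- ===== VERDICT (by name: the statement is the Claim_ definition above) =====
theorem reverse_even_spec : Claim_equal_reverse_even := by
  intro arr _
  show reverse_even arr = reverse_even_alt arr
  rw [reverse_even_eq, reverse_even_alt_eq]
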